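-- pv_equiv track=rewrite | github.com/yassinebhk/fintrack | backend/services/news.py | _detect_impact
-- ===== SOURCE A (Python) =====
-- BULLISH_KEYWORDS = ['surge', 'soar', 'rally', 'gain', 'rise', 'jump', 'record high', 'bullish', 'sube', 'gana', 'récord', 'máximo']
--
-- BEARISH_KEYWORDS = ['crash', 'plunge', 'fall', 'drop', 'decline', 'tumble', 'bearish', 'crisis', 'cae', 'pierde', 'baja', 'desplome']
--
-- def _detect_impact(title: str, description: str) -> str:
--     """Detect market impact from news text"""
--     text = f"{title} {description}".lower()
--
--     bullish_count = sum(1 for kw in BULLISH_KEYWORDS if kw in text)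
--     bearish_count = sum(1 for kw in BEARISH_KEYWORDS if kw in text)
--
--     if bullish_count > bearish_count:
--         return 'bullish'
--     elif bearish_count > bullish_count:
--         return 'bearish'
--     return 'neutral'
-- ===== SOURCE B (Python) =====
-- BULLISH_KEYWORDS = ['surge', 'soar', 'rally', 'gain', 'rise', 'jump', 'record high', 'bullish', 'sube', 'gana', 'récord', 'máximo']
--
-- BEARISH_KEYWORDS = ['crash', 'plunge', 'fall', 'drop', 'decline', 'tumble', 'bearish', 'crisis', 'cae', 'pierde', 'baja', 'desplome']
--
-- def _detect_impact(title: str, description: str) -> str: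
--     """Detect market impact by scanning the text once, position by position,
--     collecting the set of keywords that occur, then intersecting it with each
--     keyword class."""
--     text = f"{title} {description}".lower()
--     keywords = BULLISH_KEYWORDS + BEARISH_KEYWORDS
--     found = set()
--     for i in range(len(text)):
--         for kw in keywords:
--             if text.startswith(kw, i):
--                 found.add(kw)
--     bull = len(found & set(BULLISH_KEYWORDS))
--     bear = len(found & set(BEARISH_KEYWORDS))
--     if bull > bear:
--         return 'bullish'
--     if bear > bull:
--         return 'bearish'
--     return 'neutral'
-- ===== Notes on version B (the rewrite author's own statement) =====
-- stated objective: alternative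
-- what changed: Instead of testing each keyword for substring membership and tallying two counts, B scans the lowercased text once position by position, collects the set of keywords matching as a prefix at some position, and classifies by the sizes of that set's intersections with the bullish and bearish keyword lists.
import Mathlib
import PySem

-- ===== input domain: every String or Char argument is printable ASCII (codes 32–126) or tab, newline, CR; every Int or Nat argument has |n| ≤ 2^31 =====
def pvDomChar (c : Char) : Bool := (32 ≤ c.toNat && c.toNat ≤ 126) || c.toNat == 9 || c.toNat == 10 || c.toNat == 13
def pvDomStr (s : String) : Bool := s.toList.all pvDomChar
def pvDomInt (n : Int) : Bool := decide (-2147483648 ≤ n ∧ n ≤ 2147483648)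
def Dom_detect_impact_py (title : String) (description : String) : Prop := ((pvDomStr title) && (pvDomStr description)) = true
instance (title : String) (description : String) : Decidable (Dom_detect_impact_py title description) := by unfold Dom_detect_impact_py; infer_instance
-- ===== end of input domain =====

-- B replaces A's per-keyword substring tests and two tallies by a single position-by-position
-- scan of the text that collects the set of matching keywords, then classifies by the sizes of
-- that set's intersections with the two keyword classes (alternative algorithm, same cost class).

-- ===== PORT A =====
def pvBullishKeywords : List String :=
  ["surge", "soar", "rally", "gain", "rise", "jump", "record high", "bullish", "sube", "gana", "récord", "máximo"]

def pvBearishKeywords : List String :=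
  ["crash", "plunge", "fall", "drop", "decline", "tumble", "bearish", "crisis", "cae", "pierde", "baja", "desplome"]

def detect_impact_py (title : String) (description : String) : String :=
  let text := PySem.Str.lower (PySem.Str.join " " [title, description])
  let bullish_count : Int :=
    pvBullishKeywords.foldl (fun acc kw => if PySem.Str.isIn kw text then acc + 1 else acc) 0
  let bearish_count : Int :=
    pvBearishKeywords.foldl (fun acc kw => if PySem.Str.isIn kw text then acc + 1 else acc) 0
  if bullish_count > bearish_count then "bullish"
  else if bearish_count > bullish_count then "bearish"
  else "neutral"

-- ===== PORT B =====
def detect_impact_py_alt (title : String) (description : String) : String :=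
  let text := PySem.Str.lower (PySem.Str.join " " [title, description])
  let chars := text.toList
  let keywords := pvBullishKeywords ++ pvBearishKeywords
  -- for i in range(len(text)): for kw in keywords: if text.startswith(kw, i): found.add(kw)
  let found : PySem.Set String :=
    (List.range chars.length).foldl (fun fd i =>
      keywords.foldl (fun fd kw =>
        if PySem.Chars.startswith (chars.drop i) kw.toList then PySem.Set.add fd kw else fd) fd)
      PySem.Set.empty
  let bull := PySem.Set.len (PySem.Set.inter found (PySem.Set.ofList pvBullishKeywords))
  let bear := PySem.Set.len (PySem.Set.inter found (PySem.Set.ofList pvBearishKeywords))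
  if bull > bear then "bullish"
  else if bear > bull then "bearish"
  else "neutral"

-- ===== PRECONDITION & SPEC =====
def Spec_detect_impact_py (title : String) (description : String) (out : String) : Prop := out = detect_impact_py_alt title description
instance (title : String) (description : String) (out : String) : Decidable (Spec_detect_impact_py title description out) := by unfold Spec_detect_impact_py; infer_instance

-- ===== CLAIM =====
def Claim_equal_detect_impact_py : Prop := ∀ (title : String) (description : String), Dom_detect_impact_py title description → Spec_detect_impact_py title description (detect_impact_py title description)

-- ===== LEMMAS AND PROOFS =====

-- A's count loop over a keyword list is 'initial accumulator + countP'.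
theorem pv_count_fold (text : String) (ks : List String) (s : Int) :
    ks.foldl (fun acc kw => if PySem.Str.isIn kw text then acc + 1 else acc) s
      = s + (ks.countP (fun kw => PySem.Str.isIn kw text) : Int) := by
  induction ks generalizing s with
  | nil => simp
  | cons k ks ih =>
    simp only [List.foldl_cons, List.countP_cons, ih]
    by_cases h : PySem.Str.isIn k text = true
    · rw [if_pos h, if_pos h]; push_cast; ring
    · rw [if_neg h, if_neg h]; push_cast; ring

-- Membership after B's inner loop (one text position, all keywords).
theorem pv_mem_inner (p : String → Bool) (ks : List String) (fd : PySem.Set String) (x : String) :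
    x ∈ ks.foldl (fun fd kw => if p kw then PySem.Set.add fd kw else fd) fd
      ↔ x ∈ fd ∨ (x ∈ ks ∧ p x = true) := by
  induction ks generalizing fd with
  | nil => simp
  | cons k ks ih =>
    simp only [List.foldl_cons, ih, List.mem_cons]
    by_cases h : p k = true
    · rw [if_pos h]
      simp only [PySem.Set.mem_add]
      constructor
      · rintro (⟨h1 | rfl⟩ | ⟨h1, h2⟩)
        · exact Or.inl h1
        · exact Or.inr ⟨Or.inl rfl, h⟩
        · exact Or.inr ⟨Or.inr h1, h2⟩
      · rintro (h1 | ⟨rfl | h1, h2⟩)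
        · exact Or.inl (Or.inl h1)
        · exact Or.inl (Or.inr rfl)
        · exact Or.inr ⟨h1, h2⟩
    · rw [if_neg h]
      constructor
      · rintro (h1 | ⟨h1, h2⟩)
        · exact Or.inl h1
        · exact Or.inr ⟨Or.inr h1, h2⟩
      · rintro (h1 | ⟨rfl | h1, h2⟩)
        · exact Or.inl h1
        · exact absurd h2 h
        · exact Or.inr ⟨h1, h2⟩

-- B's inner loop preserves distinctness of the found-set.
theorem pv_nodup_inner (p : String → Bool) (ks : List String) (fd : PySem.Set String)
    (h : fd.Nodup) :
    (ks.foldl (fun fd kw => if p kw then PySem.Set.add fd kw else fd) fd).Nodup := by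
  induction ks generalizing fd with
  | nil => exact h
  | cons k ks ih =>
    simp only [List.foldl_cons]
    by_cases hp : p k = true
    · rw [if_pos hp]; exact ih _ (PySem.Set.nodup_add _ _ h)
    · rw [if_neg hp]; exact ih _ h

-- Membership after B's outer loop (all positions in a list).
theorem pv_mem_outer (q : Nat → String → Bool) (ks : List String) (idxs : List Nat)
    (fd : PySem.Set String) (x : String) :
    x ∈ idxs.foldl (fun fd i =>
        ks.foldl (fun fd kw => if q i kw then PySem.Set.add fd kw else fd) fd) fd
      ↔ x ∈ fd ∨ (x ∈ ks ∧ ∃ i ∈ idxs, q i x = true) := by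
  induction idxs generalizing fd with
  | nil => simp
  | cons j idxs ih =>
    simp only [List.foldl_cons, ih, pv_mem_inner, List.mem_cons]
    constructor
    · rintro ((h1 | ⟨h1, h2⟩) | ⟨h1, i, hi, h2⟩)
      · exact Or.inl h1
      · exact Or.inr ⟨h1, j, Or.inl rfl, h2⟩
      · exact Or.inr ⟨h1, i, Or.inr hi, h2⟩
    · rintro (h1 | ⟨h1, i, rfl | hi, h2⟩)
      · exact Or.inl (Or.inl h1)
      · exact Or.inl (Or.inr ⟨h1, h2⟩)
      · exact Or.inr ⟨h1, i, hi, h2⟩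

-- B's outer loop preserves distinctness.
theorem pv_nodup_outer (q : Nat → String → Bool) (ks : List String) (idxs : List Nat)
    (fd : PySem.Set String) (h : fd.Nodup) :
    (idxs.foldl (fun fd i =>
        ks.foldl (fun fd kw => if q i kw then PySem.Set.add fd kw else fd) fd) fd).Nodup := by
  induction idxs generalizing fd with
  | nil => exact h
  | cons j idxs ih => exact ih _ (pv_nodup_inner _ _ _ h)

-- For a nonempty keyword, 'matches as a prefix at some scanned position' is 'kw in text'.
theorem pv_exists_startswith_iff (chars : List Char) (kw : String) (hne : kw.toList ≠ []) :
    (∃ i ∈ List.range chars.length, PySem.Chars.startswith (chars.drop i) kw.toList = true)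
      ↔ PySem.Chars.isIn kw.toList chars = true := by
  rw [← PySem.Chars.exists_prefix_drop_iff_isIn]
  constructor
  · rintro ⟨i, _, h⟩
    exact ⟨i, (PySem.Chars.startswith_iff _ _).mp h⟩
  · rintro ⟨j, hj⟩
    by_cases hlt : j < chars.length
    · exact ⟨j, List.mem_range.mpr hlt, (PySem.Chars.startswith_iff _ _).mpr hj⟩
    · exfalso
      rw [List.drop_eq_nil_of_le (by omega)] at hj
      exact hne (List.prefix_nil.mp hj)

-- Counting the intersection of a distinct found-set with a distinct keyword list
-- equals counting the keywords that lie in the found-set.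
theorem pv_len_inter (s t : List String) (hs : s.Nodup) (ht : t.Nodup) :
    PySem.Set.len (PySem.Set.inter s t) = (t.countP (fun x => decide (x ∈ s)) : Int) := by
  have hperm : (PySem.Set.inter s t).Perm (t.filter (fun x => decide (x ∈ s))) := by
    apply (List.perm_ext_iff_of_nodup (PySem.Set.nodup_inter _ _ hs) (ht.filter _)).mpr
    intro x
    simp [PySem.Set.mem_inter, List.mem_filter, and_comm]
  simp [PySem.Set.len, hperm.length_eq, List.countP_eq_length_filter]

-- ===== VERDICT =====
theorem detect_impact_py_spec : Claim_equal_detect_impact_py := by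
  intro title description _
  unfold Spec_detect_impact_py detect_impact_py detect_impact_py_alt
  simp only [pv_count_fold, Int.zero_add]
  set text := PySem.Str.lower (PySem.Str.join " " [title, description]) with htext
  set chars := text.toList with hchars
  have hfound : ∀ x, x ∈ (List.range chars.length).foldl (fun fd i =>
      (pvBullishKeywords ++ pvBearishKeywords).foldl (fun fd kw =>
        if PySem.Chars.startswith (chars.drop i) kw.toList then PySem.Set.add fd kw else fd) fd)
      PySem.Set.empty
      ↔ x ∈ pvBullishKeywords ++ pvBearishKeywords ∧ PySem.Str.isIn x text = true := by
    intro x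
    rw [pv_mem_outer (fun i kw => PySem.Chars.startswith (chars.drop i) kw.toList)]
    constructor
    · rintro (h | ⟨hx, hex⟩)
      · simp [PySem.Set.empty] at h
      · refine ⟨hx, ?_⟩
        have hne : x.toList ≠ [] := by
          fin_cases hx <;> decide
        have := (pv_exists_startswith_iff chars x hne).mp hex
        simpa [PySem.Str.isIn, hchars] using this
    · rintro ⟨hx, hin⟩
      refine Or.inr ⟨hx, ?_⟩
      have hne : x.toList ≠ [] := by
        fin_cases hx <;> decide
      exact (pv_exists_startswith_iff chars x hne).mpr (by simpa [PySem.Str.isIn, hchars] using hin)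
  have hnodup : ((List.range chars.length).foldl (fun fd i =>
      (pvBullishKeywords ++ pvBearishKeywords).foldl (fun fd kw =>
        if PySem.Chars.startswith (chars.drop i) kw.toList then PySem.Set.add fd kw else fd) fd)
      PySem.Set.empty).Nodup := by
    exact pv_nodup_outer _ _ _ _ (by simp [PySem.Set.empty])
  set found := (List.range chars.length).foldl (fun fd i =>
      (pvBullishKeywords ++ pvBearishKeywords).foldl (fun fd kw =>
        if PySem.Chars.startswith (chars.drop i) kw.toList then PySem.Set.add fd kw else fd) fd)
      PySem.Set.empty with hfounddef
  have hcount : ∀ ks : List String, ks.Nodup → (∀ x ∈ ks, x ∈ pvBullishKeywords ++ pvBearishKeywords) →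
      PySem.Set.len (PySem.Set.inter found (PySem.Set.ofList ks))
        = ks.countP (fun kw => PySem.Str.isIn kw text) := by
    intro ks hks hsub
    rw [PySem.Set.ofList_eq_self_of_nodup ks hks, pv_len_inter found ks hnodup hks]
    refine congrArg (Nat.cast : Nat → Int) (List.countP_congr ?_)
    intro x hx
    simp only [decide_eq_true_eq, hfound]
    constructor
    · rintro ⟨_, h⟩; exact h
    · intro h; exact ⟨hsub x hx, h⟩
  have hb := hcount pvBullishKeywords (by decide) (fun x hx => List.mem_append_left _ hx)
  have hc := hcount pvBearishKeywords (by decide) (fun x hx => List.mem_append_right _ hx)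
  rw [hb, hc]
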